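-- pv_equiv track=rewrite | github.com/jess-mkg/SchoolWorkICT | Assignment 1/rush/tools.py | structure_boards
-- ===== SOURCE A (Python) =====
-- def structure_boards(boards):
--     arrs = []
--     arr = []
--     for board in boards:
--         row = []
--         for letter in board:
--             row.append(letter)
--             if len(row) == 6:
--                 arr.append(row)
--                 row = []
--         arrs.append(arr)
--         arr = []
--     return arrs
-- ===== SOURCE B (Python) =====
-- def structure_boards(boards):
--     def chunk(board):
--         if len(board) < 6:
--             return []
--         return [list(board[:6])] + chunk(board[6:])
--     return [chunk(board) for board in boards]
-- ===== Notes on version B (the rewrite author's own statement) =====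
-- stated objective: simpler
-- what changed: Replaces the char-by-char loop with a length-6 counter and mutable accumulators by a recursive 6-slice chunker mapped over the boards.
import Mathlib
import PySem

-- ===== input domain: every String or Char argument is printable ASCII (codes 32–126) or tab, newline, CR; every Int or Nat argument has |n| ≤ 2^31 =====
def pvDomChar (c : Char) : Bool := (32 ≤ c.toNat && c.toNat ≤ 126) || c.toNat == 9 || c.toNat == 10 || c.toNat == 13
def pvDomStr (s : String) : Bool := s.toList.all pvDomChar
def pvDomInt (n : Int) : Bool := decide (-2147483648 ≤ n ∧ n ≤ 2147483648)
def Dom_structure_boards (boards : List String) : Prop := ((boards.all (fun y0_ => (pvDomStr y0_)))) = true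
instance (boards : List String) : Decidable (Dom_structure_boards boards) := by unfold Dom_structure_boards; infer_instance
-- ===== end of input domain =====

-- B replaces A's per-character loop with a counter by a recursive 6-at-a-time slice chunker: same values, simpler decomposition.

-- ===== PORT A =====
-- inner loop body: row.append(letter); if len(row) == 6: arr.append(row); row = []
def pvStepA (p : List (List String) × List String) (letter : Char) :
    List (List String) × List String :=
  let row := p.2 ++ [String.mk [letter]]
  if row.length = 6 then (p.1 ++ [row], []) else (p.1, row)

def structure_boards (boards : List String) : List (List (List String)) :=
  (boards.foldl
    (fun (st : List (List (List String)) × List (List String)) board =>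
      let r := board.toList.foldl pvStepA (st.2, ([] : List String))
      (st.1 ++ [r.1], ([] : List (List String))))
    (([], []) : List (List (List String)) × List (List String))).1

-- ===== PORT B =====
-- chunk(board): [] if len < 6 else [list(board[:6])] + chunk(board[6:]); slices with
-- nonnegative bounds on the char list are exactly take/drop (PySem.List.slice_to_natCast/slice_from_natCast).
def pvChunk (cs : List Char) : List (List String) :=
  if cs.length < 6 then []
  else (cs.take 6).map (fun c => String.mk [c]) :: pvChunk (cs.drop 6)
termination_by cs.length
decreasing_by simp_all [List.length_drop]; omega

def structure_boards_alt (boards : List String) : List (List (List String)) :=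
  boards.map (fun board => pvChunk board.toList)

-- ===== PRECONDITION & SPEC =====
def Spec_structure_boards (boards : List String) (out : List (List (List String))) : Prop := out = structure_boards_alt boards
instance (boards : List String) (out : List (List (List String))) : Decidable (Spec_structure_boards boards out) := by unfold Spec_structure_boards; infer_instance

-- ===== CLAIM (what is proved, stated in full; the proofs are below) =====
def Claim_equal_structure_boards : Prop := ∀ (boards : List String), Dom_structure_boards boards → Spec_structure_boards boards (structure_boards boards)

-- ===== LEMMAS AND PROOFS =====

-- A short tail (fewer than 6 chars left for the current row) never completes a row.
lemma pvStepA_low (cs : List Char) : ∀ (arr : List (List String)) (row : List String),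
    row.length + cs.length < 6 →
    cs.foldl pvStepA (arr, row) = (arr, row ++ cs.map (fun c => String.mk [c])) := by
  induction cs with
  | nil => intro arr row _; simp
  | cons c cs ih =>
    intro arr row h
    simp only [List.foldl_cons, List.length_cons] at *
    have hne : (row ++ [String.mk [c]]).length ≠ 6 := by simp; omega
    simp only [pvStepA, if_neg hne]
    rw [ih arr (row ++ [String.mk [c]]) (by simp; omega)]
    simp

-- Exactly filling the current row appends one completed row and resets.
lemma pvStepA_fill (cs : List Char) : ∀ (rest : List Char) (arr : List (List String)) (row : List String),
    row.length + cs.length = 6 → cs ≠ [] →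
    (cs ++ rest).foldl pvStepA (arr, row) =
      rest.foldl pvStepA (arr ++ [row ++ cs.map (fun c => String.mk [c])], []) := by
  induction cs with
  | nil => intro _ _ _ _ hne; exact absurd rfl hne
  | cons c cs ih =>
    intro rest arr row h _
    simp only [List.cons_append, List.foldl_cons]
    cases cs with
    | nil =>
      have h5 : row.length = 5 := by simpa using h
      have : (row ++ [String.mk [c]]).length = 6 := by simp [h5]
      simp [pvStepA, this]
    | cons c' cs' =>
      have hne : (row ++ [String.mk [c]]).length ≠ 6 := by
        simp at h ⊢; omega
      simp only [pvStepA, if_neg hne]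
      rw [ih rest arr (row ++ [String.mk [c]]) (by simp at h ⊢; omega) (by simp)]
      simp

-- A's inner loop, started with an empty row, produces exactly the 6-chunks of the board.
lemma inner_eq_chunk (n : ℕ) : ∀ (cs : List Char), cs.length = n → ∀ (arr : List (List String)),
    (cs.foldl pvStepA (arr, [])).1 = arr ++ pvChunk cs := by
  induction n using Nat.strong_induction_on with
  | _ n ih =>
    intro cs hn arr
    by_cases h6 : cs.length < 6
    · rw [pvStepA_low cs arr [] (by simpa using h6)]
      rw [pvChunk, if_pos h6]; simp
    · have hlen : (cs.take 6).length = 6 := by simp; omega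
      have hsplit : cs = cs.take 6 ++ cs.drop 6 := (List.take_append_drop 6 cs).symm
      conv_lhs => rw [hsplit]
      rw [pvStepA_fill (cs.take 6) (cs.drop 6) arr [] (by simpa using hlen)
            (by intro hnil; rw [hnil] at hlen; simp at hlen)]
      rw [ih (cs.drop 6).length (by simp [hn] at h6 ⊢; omega) (cs.drop 6) rfl]
      conv_rhs => rw [pvChunk]
      rw [if_neg h6]
      simp only [List.nil_append, List.append_assoc, List.singleton_append]

-- The outer loop maps the chunker over the boards (the arr accumulator is reset each time).
lemma outer_eq (boards : List String) : ∀ (acc : List (List (List String))),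
    (boards.foldl
      (fun (st : List (List (List String)) × List (List String)) board =>
        let r := board.toList.foldl pvStepA (st.2, ([] : List String))
        (st.1 ++ [r.1], ([] : List (List String)))) (acc, [])).1 =
    acc ++ boards.map (fun board => pvChunk board.toList) := by
  induction boards with
  | nil => intro acc; simp
  | cons b bs ih =>
    intro acc
    simp only [List.foldl_cons, List.map_cons]
    rw [show ((b.toList.foldl pvStepA (([] : List (List String)), ([] : List String))).1)
          = pvChunk b.toList from by
        simpa using inner_eq_chunk b.toList.length b.toList rfl []]
    rw [ih]
    simp

-- ===== VERDICT (by name: the statement is the Claim_ definition above) =====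
theorem structure_boards_spec : Claim_equal_structure_boards := by
  intro boards _
  show structure_boards boards = structure_boards_alt boards
  unfold structure_boards structure_boards_alt
  simpa using outer_eq boards []
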